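-- pv_equiv track=rewrite | github.com/ariaberlian/cryptarithmetic | src/tugas_kecil1.py | nilai
-- ===== SOURCE A (Python) =====
-- def nilai(kata, dict):
--     total = 0
--     s = 1
--     balikin = kata[::-1]
--     for i in range(len(balikin)):
--         total += dict[balikin[i]] * s
--         s *= 10
--     return total
-- ===== SOURCE B (Python) =====
-- def nilai(kata, dict):
--     total = 0
--     for c in kata:
--         total = total * 10 + dict[c]
--     return total
-- ===== Notes on version B (the rewrite author's own statement) =====
-- stated objective: simpler
-- what changed: Horner's method: single left-to-right pass accumulating total = total*10 + dict[c], with no string reversal, no index loop and no place-value multiplier variable.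
import Mathlib
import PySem

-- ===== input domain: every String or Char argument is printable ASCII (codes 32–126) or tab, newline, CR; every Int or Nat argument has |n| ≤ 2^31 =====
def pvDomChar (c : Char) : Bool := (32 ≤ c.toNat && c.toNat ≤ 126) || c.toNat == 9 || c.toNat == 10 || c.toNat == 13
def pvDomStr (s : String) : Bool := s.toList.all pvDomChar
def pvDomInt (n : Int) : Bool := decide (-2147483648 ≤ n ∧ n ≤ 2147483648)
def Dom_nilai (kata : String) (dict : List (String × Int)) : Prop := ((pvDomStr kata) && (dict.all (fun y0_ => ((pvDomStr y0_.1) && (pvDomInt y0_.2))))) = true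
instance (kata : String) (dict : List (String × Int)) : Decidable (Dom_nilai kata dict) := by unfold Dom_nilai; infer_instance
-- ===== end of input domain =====

-- B replaces A's reversed-string, index-driven place-value loop by Horner's method:
-- one left-to-right pass with total = total*10 + dict[c] (simpler; same O(n) cost).

-- dict[c] where c is a character of kata (Python looks up the 1-char string); 0 default never used inside Pre_
def pvLookup (dict : List (String × Int)) (c : Char) : Int :=
  (PySem.Dict.mk dict).getD (String.ofList [c]) 0

-- ===== PORT A =====
def nilai (kata : String) (dict : List (String × Int)) : Int :=
  -- balikin = kata[::-1]; for i in range(len(balikin)): total += dict[balikin[i]] * s; s *= 10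
  ((PySem.List.pyRange 0 (PySem.List.len kata.toList.reverse) 1).foldl
      (fun (p : Int × Int) i => (p.1 + pvLookup dict (PySem.List.pyGetD kata.toList.reverse i ' ') * p.2, p.2 * 10))
      (0, 1)).1

-- ===== PORT B =====
def nilai_alt (kata : String) (dict : List (String × Int)) : Int :=
  kata.toList.foldl (fun total c => total * 10 + pvLookup dict c) 0

-- ===== PRECONDITION & SPEC =====
-- Pre_ excludes exactly the inputs where Python A raises KeyError: a character of kata absent from dict.
def Pre_nilai (kata : String) (dict : List (String × Int)) : Prop :=
  kata.toList.all (fun c => ((PySem.Dict.mk dict).get? (String.ofList [c])).isSome) = true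
instance (kata : String) (dict : List (String × Int)) : Decidable (Pre_nilai kata dict) := by unfold Pre_nilai; infer_instance

def pvWitness_nilai : String × (List (String × Int)) := ("ab", [("a", 1), ("b", 2)])

def Spec_nilai (kata : String) (dict : List (String × Int)) (out : Int) : Prop := out = nilai_alt kata dict
instance (kata : String) (dict : List (String × Int)) (out : Int) : Decidable (Spec_nilai kata dict out) := by unfold Spec_nilai; infer_instance

-- ===== CLAIM (what is proved, stated in full; the proofs are below) =====
def Claim_equal_nilai : Prop := ∀ (kata : String) (dict : List (String × Int)), Dom_nilai kata dict → Pre_nilai kata dict → Spec_nilai kata dict (nilai kata dict)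

-- ===== LEMMAS AND PROOFS =====

-- A's loop state: (total, s); step with the looked-up digit value f c
def pvStep (f : Char → Int) (p : Int × Int) (c : Char) : Int × Int :=
  (p.1 + f c * p.2, p.2 * 10)

lemma pvStep_snd (f : Char → Int) : ∀ (xs : List Char) (t s : Int),
    (xs.foldl (pvStep f) (t, s)).2 = s * 10 ^ xs.length := by
  intro xs
  induction xs with
  | nil => intro t s; simp
  | cons c rest ih =>
    intro t s
    simp only [List.foldl_cons, pvStep, ih, List.length_cons]
    ring

lemma pvHorner_eq (f : Char → Int) : ∀ (l : List Char) (t : Int),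
    l.foldl (fun total c => total * 10 + f c) t
      = (l.reverse.foldl (pvStep f) (0, 1)).1 + t * 10 ^ l.length := by
  intro l
  induction l with
  | nil => intro t; simp
  | cons c rest ih =>
    intro t
    simp only [List.foldl_cons, List.reverse_cons, List.foldl_append, List.length_cons]
    rw [ih]
    simp only [List.foldl_nil, pvStep, pvStep_snd, List.length_reverse]
    ring

-- ===== VERDICT (by name: the statement is the Claim_ definition above) =====
theorem nilai_spec : Claim_equal_nilai := by
  intro kata dict _ _
  unfold Spec_nilai nilai nilai_alt
  have h := PySem.List.foldl_pyRange_pyGetD kata.toList.reverse ' ' (pvStep (pvLookup dict))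
      ((0 : Int), (1 : Int)) (a := 0) (by omega)
  simp only [pvStep] at h
  rw [h, pvHorner_eq (pvLookup dict) kata.toList 0]
  simp
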